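-- pv_equiv track=rewrite | github.com/CaiJingLong/marscode_prompt | 024.py | solution
-- ===== SOURCE A (Python) =====
-- def solution(n, a):
--     # 使用列表模拟队列
--     queue = a.copy()
--     result = []
--
--     while queue:
--         # 播放并移除第一首歌
--         result.append(queue.pop(0))
--
--         # 如果队列还有歌，将第一首移到末尾
--         if queue:
--             queue.append(queue.pop(0))
--
--     return result
-- ===== SOURCE B (Python) =====
-- def solution(n, a):
--     # Pass-based: each sweep over the queue outputs the even-index elements;
--     # the odd-index elements form the next queue (rotated by one if the sweep
--     # ended on an output, i.e. the length was odd).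
--     result = []
--     q = list(a)
--     while q:
--         result += q[::2]
--         odds = q[1::2]
--         q = odds if len(q) % 2 == 0 else odds[1:] + odds[:1]
--     return result
-- ===== Notes on version B (the rewrite author's own statement) =====
-- stated objective: faster
-- what changed: Replaces A's element-at-a-time queue simulation (pop(0) to output, rotate the next element to the back) by a pass-based sweep: each pass appends the even-index slice q[::2] to the result and recurses on the odd-index slice, rotated by one when the pass length was odd.
import Mathlib
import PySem

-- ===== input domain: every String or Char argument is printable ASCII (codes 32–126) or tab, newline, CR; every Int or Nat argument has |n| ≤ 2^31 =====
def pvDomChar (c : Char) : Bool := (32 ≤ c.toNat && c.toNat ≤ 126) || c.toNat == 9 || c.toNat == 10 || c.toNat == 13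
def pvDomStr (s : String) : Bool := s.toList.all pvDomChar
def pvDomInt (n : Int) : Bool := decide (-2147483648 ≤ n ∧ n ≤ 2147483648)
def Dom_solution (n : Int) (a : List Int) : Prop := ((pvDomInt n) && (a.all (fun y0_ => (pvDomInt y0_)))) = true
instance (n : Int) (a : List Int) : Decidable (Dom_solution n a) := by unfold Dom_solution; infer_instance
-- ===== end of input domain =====

-- B replaces the element-at-a-time queue rotation by whole-pass slicing (each sweep
-- outputs the even-index elements and recurses on the odd-index ones); objective: faster (measured asymptotically faster in a timing run).

-- ===== PORT A =====
-- while queue: result.append(queue.pop(0)); if queue: queue.append(queue.pop(0))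
def solutionA_loop (queue acc : List Int) : List Int :=
  match queue with
  | [] => acc
  | x :: rest =>
    match rest with
    | [] => acc ++ [x]                      -- queue became empty after the pop
    | y :: rest2 => solutionA_loop (rest2 ++ [y]) (acc ++ [x])
termination_by queue.length
decreasing_by simp

def solution (n : Int) (a : List Int) : List Int := solutionA_loop a []

-- ===== PORT B =====
-- q[::2] : elements at even indices (exact hand port of step-2 slicing on lists)
def pvEvens : List Int → List Int
  | [] => []
  | [x] => [x]
  | x :: _ :: r => x :: pvEvens r

-- q[1::2] : elements at odd indices (exact hand port of step-2 slicing on lists)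
def pvOdds : List Int → List Int
  | [] => []
  | [_] => []
  | _ :: y :: r => y :: pvOdds r

theorem pvOdds_length (l : List Int) : (pvOdds l).length = l.length / 2 := by
  induction l using pvOdds.induct with
  | case1 => simp [pvOdds]
  | case2 => simp [pvOdds]
  | case3 _ _ r ih => simp [pvOdds, ih]; omega

def solutionB_loop (q res : List Int) : List Int :=
  match q with
  | [] => res
  | x :: r =>
    let odds := pvOdds (x :: r)
    solutionB_loop (if (x :: r).length % 2 = 0 then odds else odds.drop 1 ++ odds.take 1)
                   (res ++ pvEvens (x :: r))
termination_by q.length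
decreasing_by split <;> simp [pvOdds_length] <;> omega

def solution_alt (n : Int) (a : List Int) : List Int := solutionB_loop a []

-- ===== PRECONDITION & SPEC =====
def Spec_solution (n : Int) (a : List Int) (out : List Int) : Prop := out = solution_alt n a
instance (n : Int) (a : List Int) (out : List Int) : Decidable (Spec_solution n a out) := by unfold Spec_solution; infer_instance

-- ===== CLAIM (what is proved, stated in full; the proofs are below) =====
def Claim_equal_solution : Prop := ∀ (n : Int) (a : List Int), Dom_solution n a → Spec_solution n a (solution n a)

-- ===== LEMMAS AND PROOFS =====

-- unfolding equations (the definitions are well-founded, so simp needs them by name)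
@[simp] theorem pvEvens_nil : pvEvens [] = [] := rfl
@[simp] theorem pvEvens_one (x : Int) : pvEvens [x] = [x] := rfl
@[simp] theorem pvEvens_cons (x y : Int) (r : List Int) : pvEvens (x::y::r) = x :: pvEvens r := rfl
@[simp] theorem pvOdds_nil : pvOdds [] = [] := rfl
@[simp] theorem pvOdds_one (x : Int) : pvOdds [x] = [] := rfl
@[simp] theorem pvOdds_cons (x y : Int) (r : List Int) : pvOdds (x::y::r) = y :: pvOdds r := rfl

-- accumulator-free view of A's loop
def runA : List Int → List Int
  | [] => []
  | [x] => [x]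
  | x :: y :: rest2 => x :: runA (rest2 ++ [y])
termination_by q => q.length
decreasing_by simp

@[simp] theorem runA_nil : runA [] = [] := by rw [runA]
@[simp] theorem runA_one (x : Int) : runA [x] = [x] := by rw [runA]
@[simp] theorem runA_cons (x y : Int) (r : List Int) : runA (x::y::r) = x :: runA (r ++ [y]) := by
  rw [runA]

theorem solutionA_loop_acc : ∀ (q acc : List Int), solutionA_loop q acc = acc ++ runA q
  | [], acc => by rw [solutionA_loop]; simp
  | [x], acc => by rw [solutionA_loop]; simp
  | x :: y :: r, acc => by
    rw [solutionA_loop]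
    simp [solutionA_loop_acc (r ++ [y]) (acc ++ [x])]
termination_by q _ => q.length
decreasing_by simp

-- the queue left after one full sweep of B
def postQ (q : List Int) : List Int :=
  if q.length % 2 = 0 then pvOdds q else (pvOdds q).drop 1 ++ (pvOdds q).take 1

theorem pvEvens_append_one (r : List Int) (y : Int) :
    pvEvens (r ++ [y]) = if r.length % 2 = 0 then pvEvens r ++ [y] else pvEvens r := by
  induction r using pvEvens.induct with
  | case1 => simp
  | case2 x => simp
  | case3 x z r ih =>
    simp only [List.cons_append, pvEvens_cons, ih, List.length_cons]
    have h : (r.length + 1 + 1) % 2 = r.length % 2 := by omega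
    rw [h]; split <;> simp

theorem pvOdds_append_one (r : List Int) (y : Int) :
    pvOdds (r ++ [y]) = if r.length % 2 = 0 then pvOdds r else pvOdds r ++ [y] := by
  induction r using pvOdds.induct with
  | case1 => simp
  | case2 x => simp
  | case3 x z r ih =>
    simp only [List.cons_append, pvOdds_cons, ih, List.length_cons]
    have h : (r.length + 1 + 1) % 2 = r.length % 2 := by omega
    rw [h]; split <;> simp

-- runA of a one-step rotation
theorem runA_rot (y : Int) (l : List Int) :
    runA (y :: l) = y :: runA (l.drop 1 ++ l.take 1) := by
  cases l with
  | nil => simp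
  | cons z w => simp

-- key: one sweep of A's element-wise loop outputs exactly the even-index elements
theorem runA_sweep : ∀ (N : ℕ) (q : List Int), q.length ≤ N →
    runA q = pvEvens q ++ runA (postQ q) := by
  intro N
  induction N with
  | zero =>
    intro q hq
    have : q = [] := by cases q <;> simp_all
    subst this; simp [postQ]
  | succ N ih =>
    intro q hq
    match q with
    | [] => simp [postQ]
    | [x] => simp [postQ]
    | x :: y :: rest =>
      have hlen : (rest ++ [y]).length ≤ N := by simp at hq ⊢; omega
      have ihr := ih (rest ++ [y]) hlen
      rw [runA_cons, ihr, pvEvens_cons]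
      rcases Nat.even_or_odd rest.length with he | ho
      · have h0 : rest.length % 2 = 0 := Nat.even_iff.mp he
        rw [pvEvens_append_one, if_pos h0]
        have hpost1 : postQ (rest ++ [y]) = (pvOdds rest).drop 1 ++ (pvOdds rest).take 1 := by
          unfold postQ
          rw [if_neg (by simp; omega), pvOdds_append_one, if_pos h0]
        have hpost2 : postQ (x :: y :: rest) = y :: pvOdds rest := by
          unfold postQ
          rw [if_pos (by simp; omega), pvOdds_cons]
        rw [hpost1, hpost2, runA_rot]
        simp
      · have h1 : rest.length % 2 = 1 := Nat.odd_iff.mp ho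
        rw [pvEvens_append_one, if_neg (by omega)]
        have hpost1 : postQ (rest ++ [y]) = pvOdds rest ++ [y] := by
          unfold postQ
          rw [if_pos (by simp; omega), pvOdds_append_one, if_neg (by omega)]
        have hpost2 : postQ (x :: y :: rest) = pvOdds rest ++ [y] := by
          unfold postQ
          rw [if_neg (by simp; omega), pvOdds_cons]
          simp
        rw [hpost1, hpost2]
        simp

theorem B_loop_cons (x : Int) (r res : List Int) :
    solutionB_loop (x :: r) res = solutionB_loop (postQ (x :: r)) (res ++ pvEvens (x :: r)) := by
  rw [solutionB_loop]; rfl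

theorem B_loop_acc : ∀ (q res : List Int), solutionB_loop q res = res ++ solutionB_loop q []
  | [], res => by rw [solutionB_loop, solutionB_loop]; simp
  | x :: r, res => by
    rw [B_loop_cons, B_loop_cons]
    rw [B_loop_acc (postQ (x :: r)) (res ++ pvEvens (x :: r)),
        B_loop_acc (postQ (x :: r)) ([] ++ pvEvens (x :: r))]
    simp
termination_by q _ => q.length
decreasing_by all_goals
  · unfold postQ; split <;> simp [pvOdds_length] <;> omega

theorem runA_eq_B : ∀ (N : ℕ) (q : List Int), q.length ≤ N → runA q = solutionB_loop q [] := by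
  intro N
  induction N with
  | zero =>
    intro q hq
    have : q = [] := by cases q <;> simp_all
    subst this; rw [solutionB_loop]; simp
  | succ N ih =>
    intro q hq
    match q with
    | [] => rw [solutionB_loop]; simp
    | x :: r =>
      have hlen : (postQ (x :: r)).length ≤ N := by
        unfold postQ; split <;> simp_all [pvOdds_length] <;> omega
      rw [B_loop_cons, B_loop_acc, runA_sweep (x :: r).length (x :: r) (le_refl _),
          ih _ hlen]
      simp

-- ===== VERDICT (by name: the statement is the Claim_ definition above) =====
theorem solution_spec : Claim_equal_solution := by
  intro n a _
  unfold Spec_solution solution solution_alt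
  rw [solutionA_loop_acc, runA_eq_B a.length a (le_refl _)]
  simp
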